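-- pv_equiv track=rewrite | github.com/aishanawaz6/Academics | FAST-NUCES LHR (BSCS)/Mining Massive Datasets/Quizes Solved/Quiz 1/quiz1v2.py | combiner_reducer
-- ===== SOURCE A (Python) =====
-- def combiner_reducer(key,value):
--     skippedCount=0
--     clickedCount=0
--     watchCount=0
--     watchSum=0
--
--     for scount,ccount,wCount in value:
--         skippedCount=skippedCount+scount
--         clickedCount=clickedCount+ccount
--         sumW,countW=wCount
--         watchCount=watchCount+countW
--         watchSum=watchSum+sumW
--
--     yield key,(skippedCount,clickedCount,(watchCount,watchSum))
-- ===== SOURCE B (Python) =====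
-- def combiner_reducer(key, value):
--     value = list(value)
--     skipped = sum(s for s, c, w in value)
--     clicked = sum(c for s, c, w in value)
--     watchSum = sum(sw for s, c, (sw, cw) in value)
--     watchCount = sum(cw for s, c, (sw, cw) in value)
--     yield key, (skipped, clicked, (watchCount, watchSum))
-- ===== Notes on version B (the rewrite author's own statement) =====
-- stated objective: alternative
-- what changed: Replaces the single fused loop over four accumulators with four independent column-wise summations over the materialized value list.
import Mathlib
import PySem

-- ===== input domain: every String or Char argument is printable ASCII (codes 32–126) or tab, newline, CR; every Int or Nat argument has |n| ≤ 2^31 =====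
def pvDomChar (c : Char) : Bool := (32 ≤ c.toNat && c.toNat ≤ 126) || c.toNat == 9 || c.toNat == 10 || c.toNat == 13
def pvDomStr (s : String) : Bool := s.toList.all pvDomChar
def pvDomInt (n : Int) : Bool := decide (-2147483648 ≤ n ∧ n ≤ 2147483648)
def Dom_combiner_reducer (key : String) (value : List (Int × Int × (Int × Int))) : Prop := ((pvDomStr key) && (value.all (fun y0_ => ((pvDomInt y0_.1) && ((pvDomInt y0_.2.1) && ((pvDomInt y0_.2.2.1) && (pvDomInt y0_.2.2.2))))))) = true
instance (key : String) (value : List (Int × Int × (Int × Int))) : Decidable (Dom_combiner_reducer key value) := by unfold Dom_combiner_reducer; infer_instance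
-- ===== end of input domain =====

-- B computes the same aggregates as four independent column-wise sums instead of one fused loop (objective: alternative decomposition).


-- ===== PORT A =====
-- fused loop over four accumulators, then a single yield
def combiner_reducer (key : String) (value : List (Int × Int × (Int × Int))) : List (String × (Int × Int × (Int × Int))) :=
  let st := value.foldl
    (fun (acc : Int × Int × Int × Int) x =>
      let (skippedCount, clickedCount, watchCount, watchSum) := acc
      let (scount, ccount, wCount) := x
      let (sumW, countW) := wCount
      (skippedCount + scount, clickedCount + ccount, watchCount + countW, watchSum + sumW))
    (0, 0, 0, 0)
  [(key, (st.1, st.2.1, (st.2.2.1, st.2.2.2)))]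

-- ===== PORT B =====
-- four independent column-wise sums
def combiner_reducer_alt (key : String) (value : List (Int × Int × (Int × Int))) : List (String × (Int × Int × (Int × Int))) :=
  let skipped := (value.map (fun x => x.1)).sum
  let clicked := (value.map (fun x => x.2.1)).sum
  let watchSum := (value.map (fun x => x.2.2.1)).sum
  let watchCount := (value.map (fun x => x.2.2.2)).sum
  [(key, (skipped, clicked, (watchCount, watchSum)))]

-- ===== PRECONDITION & SPEC =====
def Spec_combiner_reducer (key : String) (value : List (Int × Int × (Int × Int))) (out : List (String × (Int × Int × (Int × Int)))) : Prop := out = combiner_reducer_alt key value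
instance (key : String) (value : List (Int × Int × (Int × Int))) (out : List (String × (Int × Int × (Int × Int)))) : Decidable (Spec_combiner_reducer key value out) := by unfold Spec_combiner_reducer; infer_instance

-- ===== CLAIM =====
def Claim_equal_combiner_reducer : Prop := ∀ (key : String) (value : List (Int × Int × (Int × Int))), Dom_combiner_reducer key value → Spec_combiner_reducer key value (combiner_reducer key value)

-- ===== LEMMAS AND PROOFS =====
-- the fold's final state equals the four column sums shifted by the initial accumulators
theorem combiner_reducer_fold (value : List (Int × Int × (Int × Int))) (a b c d : Int) :
    value.foldl
      (fun (acc : Int × Int × Int × Int) x =>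
        let (skippedCount, clickedCount, watchCount, watchSum) := acc
        let (scount, ccount, wCount) := x
        let (sumW, countW) := wCount
        (skippedCount + scount, clickedCount + ccount, watchCount + countW, watchSum + sumW))
      (a, b, c, d)
    = (a + (value.map (fun x => x.1)).sum,
       b + (value.map (fun x => x.2.1)).sum,
       c + (value.map (fun x => x.2.2.2)).sum,
       d + (value.map (fun x => x.2.2.1)).sum) := by
  induction value generalizing a b c d with
  | nil => simp
  | cons h t ih =>
    obtain ⟨s, cc, sw, cw⟩ := h
    simp [List.foldl, ih]
    refine ⟨by ring, by ring, by ring, by ring⟩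

-- ===== VERDICT =====
theorem combiner_reducer_spec : Claim_equal_combiner_reducer := by
  intro key value _
  unfold Spec_combiner_reducer combiner_reducer combiner_reducer_alt
  simp [combiner_reducer_fold]
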